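-- pv_equiv track=rewrite | github.com/berabuddies/Semia | .github/scripts/assemble_plugin_skills.py | _strip_top_h1
-- ===== SOURCE A (Python) =====
-- def _strip_top_h1(text: str) -> str:
--     lines = text.splitlines(keepends=True)
--     out: list[str] = []
--     skipped_h1 = False
--     skipping_intro = False
--     for line in lines:
--         if not skipped_h1 and line.startswith("# "):
--             skipped_h1 = True
--             skipping_intro = True
--             continue
--         if skipping_intro:
--             # Drop the lines between the H1 and the first H2/H3, including any
--             # intro paragraphs the canonical body uses to introduce itself. The
--             # per-host overlay supplies its own intro.
--             if line.startswith("## ") or line.startswith("### "):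
--                 skipping_intro = False
--             else:
--                 continue
--         out.append(line)
--     return "".join(out)
-- ===== SOURCE B (Python) =====
-- def _strip_top_h1(text: str) -> str:
--     lines = text.splitlines(keepends=True)
--     i = next((k for k, line in enumerate(lines) if line.startswith("# ")), None)
--     if i is None:
--         return text
--     tail = lines[i + 1:]
--     j = next((k for k, line in enumerate(tail) if line.startswith(("## ", "### "))), None)
--     if j is None:
--         return "".join(lines[:i])
--     return "".join(lines[:i] + tail[j:])
-- ===== Notes on version B (the rewrite author's own statement) =====
-- stated objective: simpler
-- what changed: Replaces the stateful line loop with skipped_h1/skipping_intro flags by locating two boundary indices (first '# ' line, first following '## '/'### ' line) and returning slices of the line list.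
import Mathlib
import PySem

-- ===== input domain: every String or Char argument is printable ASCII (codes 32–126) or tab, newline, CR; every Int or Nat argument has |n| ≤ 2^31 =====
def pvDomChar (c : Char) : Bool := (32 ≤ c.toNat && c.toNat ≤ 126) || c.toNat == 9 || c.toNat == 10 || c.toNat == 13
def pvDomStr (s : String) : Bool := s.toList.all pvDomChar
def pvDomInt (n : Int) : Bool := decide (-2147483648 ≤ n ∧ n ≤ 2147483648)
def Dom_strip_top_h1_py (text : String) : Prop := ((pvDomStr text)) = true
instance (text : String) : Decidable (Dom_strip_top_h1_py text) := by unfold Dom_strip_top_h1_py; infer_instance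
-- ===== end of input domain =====

-- B strips the top H1 and the intro below it by computing two boundary indices and slicing,
-- instead of A's stateful flag loop; objective: simpler.

-- shared primitive: text.splitlines(keepends=True) — exact on the Dom alphabet, where the
-- only line breaks are '\n', '\r' and '\r\n'
def pvSplitKeep : List Char → List (List Char)
  | [] => []
  | '\r' :: '\n' :: rest => ['\r', '\n'] :: pvSplitKeep rest
  | '\n' :: rest => ['\n'] :: pvSplitKeep rest
  | '\r' :: rest => ['\r'] :: pvSplitKeep rest
  | c :: rest =>
    match pvSplitKeep rest with
    | [] => [[c]]
    | l :: ls => (c :: l) :: ls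

-- line.startswith("# ") / line.startswith(("## ", "### "))
def pvIsH1 (l : List Char) : Bool := PySem.Chars.startswith l ['#', ' ']
def pvIsH23 (l : List Char) : Bool :=
  PySem.Chars.startswith l ['#', '#', ' '] || PySem.Chars.startswith l ['#', '#', '#', ' ']

-- ===== PORT A =====
-- loop body of A over state (out, skipped_h1, skipping_intro)
def pvStepA (st : List (List Char) × Bool × Bool) (line : List Char) :
    List (List Char) × Bool × Bool :=
  match st with
  | (out, skipped, skipping) =>
    if !skipped && pvIsH1 line then (out, true, true)
    else if skipping then
      if pvIsH23 line then (out ++ [line], skipped, false)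
      else (out, skipped, skipping)
    else (out ++ [line], skipped, skipping)

def strip_top_h1_py (text : String) : String :=
  let lines := pvSplitKeep text.toList
  let r := lines.foldl pvStepA ([], false, false)
  String.ofList r.1.flatten

-- ===== PORT B =====
def strip_top_h1_py_alt (text : String) : String :=
  let lines := pvSplitKeep text.toList
  match lines.findIdx? pvIsH1 with
  | none => text
  | some i =>
    let tail := lines.drop (i + 1)
    match tail.findIdx? pvIsH23 with
    | none => String.ofList (lines.take i).flatten
    | some j => String.ofList (lines.take i ++ tail.drop j).flatten

-- ===== PRECONDITION & SPEC =====
def Spec_strip_top_h1_py (text : String) (out : String) : Prop := out = strip_top_h1_py_alt text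
instance (text : String) (out : String) : Decidable (Spec_strip_top_h1_py text out) := by unfold Spec_strip_top_h1_py; infer_instance

-- ===== CLAIM (what is proved, stated in full; the proofs are below) =====
def Claim_equal_strip_top_h1_py : Prop := ∀ (text : String), Dom_strip_top_h1_py text → Spec_strip_top_h1_py text (strip_top_h1_py text)

-- ===== LEMMAS AND PROOFS =====

theorem pvSplitKeep_flatten (cs : List Char) : (pvSplitKeep cs).flatten = cs := by
  induction cs using pvSplitKeep.induct with
  | case1 => rfl
  | case2 rest ih => simp [pvSplitKeep, ih]
  | case3 rest ih => simp_all [pvSplitKeep]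
  | case4 rest h ih => simp_all [pvSplitKeep]
  | case5 c rest h1 h2 h3 hnil ih => simp_all [pvSplitKeep]
  | case6 c rest h1 h2 h3 l ls hcons ih => simp_all [pvSplitKeep]

-- done state: everything is appended
theorem pvFoldA_done (ls : List (List Char)) (out : List (List Char)) :
    ls.foldl pvStepA (out, true, false) = (out ++ ls, true, false) := by
  induction ls generalizing out with
  | nil => simp
  | cons l ls ih => simp [pvStepA, ih]

-- skipping_intro state: drop until the first H2/H3 line
theorem pvFoldA_skip (ls : List (List Char)) (out : List (List Char)) :
    ls.foldl pvStepA (out, true, true) =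
      (match ls.findIdx? pvIsH23 with
       | none => (out, true, true)
       | some j => (out ++ ls.drop j, true, false)) := by
  induction ls generalizing out with
  | nil => simp
  | cons l ls ih =>
    by_cases h : pvIsH23 l = true
    · simp [pvStepA, h, List.findIdx?_cons, pvFoldA_done]
    · have hs : pvStepA (out, true, true) l = (out, true, true) := by simp [pvStepA, h]
      rw [List.foldl_cons, hs, ih, List.findIdx?_cons]
      simp only [h, if_false, Bool.false_eq_true]
      cases hf : ls.findIdx? pvIsH23 <;> simp

-- initial state: keep everything before the first H1, then the skip lemma applies
theorem pvFoldA_init (ls : List (List Char)) (out : List (List Char)) :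
    (ls.foldl pvStepA (out, false, false)).1 =
      out ++ (match ls.findIdx? pvIsH1 with
       | none => ls
       | some i =>
         ls.take i ++ (match (ls.drop (i + 1)).findIdx? pvIsH23 with
           | none => []
           | some j => (ls.drop (i + 1)).drop j)) := by
  induction ls generalizing out with
  | nil => simp
  | cons l ls ih =>
    by_cases h : pvIsH1 l = true
    · have hs : pvStepA (out, false, false) l = (out, true, true) := by simp [pvStepA, h]
      rw [List.foldl_cons, hs, pvFoldA_skip, List.findIdx?_cons]
      simp only [h, if_pos]
      cases hf : ls.findIdx? pvIsH23 <;> simp [hf]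
    · have hs : pvStepA (out, false, false) l = (out ++ [l], false, false) := by
        simp [pvStepA, h]
      rw [List.foldl_cons, hs, ih, List.findIdx?_cons]
      simp only [h, if_false, Bool.false_eq_true]
      cases hf : ls.findIdx? pvIsH1 <;> simp

-- ===== VERDICT (by name: the statement is the Claim_ definition above) =====
theorem strip_top_h1_py_spec : Claim_equal_strip_top_h1_py := by
  intro text _
  unfold Spec_strip_top_h1_py strip_top_h1_py strip_top_h1_py_alt
  simp only [pvFoldA_init, List.nil_append]
  rcases h1 : (pvSplitKeep text.toList).findIdx? pvIsH1 with _ | i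
  · simp [pvSplitKeep_flatten]
  · simp only [List.drop_drop]
    rcases h2 : ((pvSplitKeep text.toList).drop (i + 1)).findIdx? pvIsH23 with _ | j
    · simp only [h2]; simp
    · simp only [h2]
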